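-- pv_equiv track=rewrite | github.com/batkaevruslan/yandex_algorithm5.0 | homework1/I/I.py | getBestAdnWorstDays
-- ===== SOURCE A (Python) =====
-- def getBestAdnWorstDays(year, yearStartDay, holidays):
--     monthNumberByName = {
--         "January":1,
--         "February":2,
--         "March":3,
--         "April":4,
--         "May":5,
--         "June":6,
--         "July":7,
--         "August":8,
--         "September":9,
--         "October":10,
--         "November":11,
--         "December":12
--         }
--     dayCountByMonth = { 1:31, 2:28, 3:31, 4:30, 5:31, 6:30, 7:31, 8:31, 9:30, 10:31, 11:30, 12:31}
--
--     isLeapYear = year % 400 == 0 or (year % 4 == 0 and year % 100 != 0)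
--     totalDayCount = 366 if isLeapYear else 365
--     dayCountByDayOfWeek = {}
--     holidaySet = set(map(lambda x: (monthNumberByName[x[0]], x[1]), holidays))
--     currentMonth = monthNumberByName["January"]
--     currentMonthMaxDays = dayCountByMonth[currentMonth]
--     currentMonthDay = 1
--     holidayByDayOfWeek = {}
--     for day in range(totalDayCount):
--         currentDayOfWeek = (yearStartDay + day) % 7
--         dayCountByDayOfWeek.setdefault(currentDayOfWeek, 0)
--         dayCountByDayOfWeek[currentDayOfWeek] += 1
--
--         if (currentMonth, currentMonthDay) in holidaySet:
--             holidayByDayOfWeek.setdefault(currentDayOfWeek, 0)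
--             holidayByDayOfWeek[currentDayOfWeek] += 1
--
--         currentMonthDay += 1
--         if currentMonthDay > currentMonthMaxDays and currentMonth != monthNumberByName["December"]:
--             currentMonth += 1
--             currentMonthDay = 1
--             currentMonthMaxDays = dayCountByMonth[currentMonth]
--             if isLeapYear and currentMonth == monthNumberByName["February"]:
--                 currentMonthMaxDays += 1
--
--     bestDay = 1
--     maxNonWorkingDays = 0
--     worstDay = 1
--     minNonWorkingDays = 366
--     dayOfWeekNameByNumber = { 0:"Monday", 1:"Tuesday", 2:"Wednesday", 3:"Thursday", 4:"Friday", 5:"Saturday", 6:"Sunday"}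
--     for nonWorkingDayOfWeek in dayOfWeekNameByNumber.keys():
--         nonWorkingDayCount = dayCountByDayOfWeek[nonWorkingDayOfWeek]
--         totalExtraHolidays = 0
--         for workingDayOfWeek in dayOfWeekNameByNumber.keys():
--             if nonWorkingDayOfWeek != workingDayOfWeek:
--                 totalExtraHolidays += holidayByDayOfWeek.setdefault(workingDayOfWeek, 0)
--
--         totalNonWorkingDays = nonWorkingDayCount + totalExtraHolidays
--         if totalNonWorkingDays > maxNonWorkingDays:
--             maxNonWorkingDays = totalNonWorkingDays
--             bestDay = nonWorkingDayOfWeek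
--
--         if minNonWorkingDays > totalNonWorkingDays:
--             minNonWorkingDays = totalNonWorkingDays
--             worstDay = nonWorkingDayOfWeek
--
--     return (dayOfWeekNameByNumber[bestDay], dayOfWeekNameByNumber[worstDay])
-- ===== SOURCE B (Python) =====
-- def getBestAdnWorstDays(year, yearStartDay, holidays):
--     monthNumberByName = {
--         "January": 1, "February": 2, "March": 3, "April": 4,
--         "May": 5, "June": 6, "July": 7, "August": 8,
--         "September": 9, "October": 10, "November": 11, "December": 12
--     }
--     isLeapYear = year % 400 == 0 or (year % 4 == 0 and year % 100 != 0)
--     monthLengths = [31, 29 if isLeapYear else 28, 31, 30, 31, 30, 31, 31, 30, 31, 30, 31]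
--     totalDayCount = 366 if isLeapYear else 365
--
--     # days-before-month offsets: offsets[m-1] = number of days before month m
--     offsets = []
--     acc = 0
--     for ml in monthLengths:
--         offsets.append(acc)
--         acc += ml
--
--     # holidays deduped as (monthNumber, day); each distinct valid date lands on
--     # exactly one weekday, computed in closed form from its day-of-year index
--     holidaySet = {(monthNumberByName[name], d) for (name, d) in holidays}
--     holidayByDayOfWeek = [0] * 7
--     for (m, d) in holidaySet:
--         if 1 <= d <= monthLengths[m - 1]:
--             holidayByDayOfWeek[(yearStartDay + offsets[m - 1] + d - 1) % 7] += 1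
--     totalHolidays = sum(holidayByDayOfWeek)
--
--     names = ["Monday", "Tuesday", "Wednesday", "Thursday", "Friday", "Saturday", "Sunday"]
--     bestDay, maxNonWorkingDays, worstDay, minNonWorkingDays = 1, 0, 1, 366
--     for w in range(7):
--         # closed-form weekday count: 52 full weeks plus the leading extra day(s)
--         count = totalDayCount // 7 + (1 if (w - yearStartDay) % 7 < totalDayCount % 7 else 0)
--         total = count + totalHolidays - holidayByDayOfWeek[w]
--         if total > maxNonWorkingDays:
--             maxNonWorkingDays, bestDay = total, w
--         if minNonWorkingDays > total:
--             minNonWorkingDays, worstDay = total, w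
--     return (names[bestDay], names[worstDay])
-- ===== Notes on version B (the rewrite author's own statement) =====
-- stated objective: faster
-- what changed: B replaces A's 365/366-iteration day-by-day calendar simulation by closed forms: weekday totals from totalDayCount//7 plus the leading remainder days, and each distinct holiday's weekday from a days-before-month offset table, so the per-call work is O(12 + len(holidays)) instead of a full-year walk; the best/worst selection keeps A's tie-breaking but uses total-minus-own instead of A's inner 7-way sum.
import Mathlib
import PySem

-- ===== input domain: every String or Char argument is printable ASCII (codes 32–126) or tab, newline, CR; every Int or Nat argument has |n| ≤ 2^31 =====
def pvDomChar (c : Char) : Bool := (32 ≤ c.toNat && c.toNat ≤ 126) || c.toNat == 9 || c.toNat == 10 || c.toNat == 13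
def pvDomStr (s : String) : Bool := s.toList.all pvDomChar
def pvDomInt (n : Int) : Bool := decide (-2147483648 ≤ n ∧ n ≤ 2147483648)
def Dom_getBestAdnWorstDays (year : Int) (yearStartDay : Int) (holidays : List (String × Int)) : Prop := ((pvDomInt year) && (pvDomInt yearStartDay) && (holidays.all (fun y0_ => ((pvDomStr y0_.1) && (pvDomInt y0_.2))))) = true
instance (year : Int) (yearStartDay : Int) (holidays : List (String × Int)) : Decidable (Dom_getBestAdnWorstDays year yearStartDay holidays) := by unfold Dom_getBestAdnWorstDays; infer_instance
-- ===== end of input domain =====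

-- B replaces A's day-by-day year walk by closed-form weekday counts and a
-- days-before-month offset table for the holidays: a different algorithm, no per-day simulation.

-- shared literal table (the same dict literal appears in both Python sources)
def pvMonthNumberByName : PySem.Dict String Int :=
  PySem.Dict.ofList [("January", 1), ("February", 2), ("March", 3), ("April", 4),
    ("May", 5), ("June", 6), ("July", 7), ("August", 8),
    ("September", 9), ("October", 10), ("November", 11), ("December", 12)]

-- ===== PORT A =====
def pvDayCountByMonth : PySem.Dict Int Int :=
  PySem.Dict.ofList [(1, 31), (2, 28), (3, 31), (4, 30), (5, 31), (6, 30), (7, 31),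
    (8, 31), (9, 30), (10, 31), (11, 30), (12, 31)]

def pvDayOfWeekNameByNumber : PySem.Dict Int String :=
  PySem.Dict.ofList [(0, "Monday"), (1, "Tuesday"), (2, "Wednesday"), (3, "Thursday"),
    (4, "Friday"), (5, "Saturday"), (6, "Sunday")]

-- the calendar part of A's day loop: advance (currentMonth, currentMonthDay, currentMonthMaxDays)
def pvCalStepA (isLeapYear : Bool) (c : Int × Int × Int) : Int × Int × Int :=
  let cmd := c.2.1 + 1
  if cmd > c.2.2 ∧ c.1 ≠ (pvMonthNumberByName.get? "December").getD 0 then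
    let cm := c.1 + 1
    let cmmax := (pvDayCountByMonth.get? cm).getD 0
    let cmmax := if isLeapYear = true ∧ cm = (pvMonthNumberByName.get? "February").getD 0 then cmmax + 1 else cmmax
    (cm, 1, cmmax)
  else (c.1, cmd, c.2.2)

-- the dictionary part of A's day loop (setdefault then `+= 1`; lookups total: key present after setdefault)
def pvDictStepA (yearStartDay : Int) (S : PySem.Set (Int × Int)) (c : Int × Int × Int)
    (day : Int) (d : PySem.Dict Int Int × PySem.Dict Int Int) :
    PySem.Dict Int Int × PySem.Dict Int Int :=
  let w := PySem.Int.mod (yearStartDay + day) 7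
  let dc := d.1.setdefault w 0
  let dc := dc.insert w ((dc.get? w).getD 0 + 1)
  let hol :=
    if PySem.Set.contains S (c.1, c.2.1) then
      let h := d.2.setdefault w 0
      h.insert w ((h.get? w).getD 0 + 1)
    else d.2
  (dc, hol)

-- the inner `for workingDayOfWeek in ...` loop: running sum of setdefault(w', 0) return values
def pvInnerA (w : Int) (h : PySem.Dict Int Int) : Int × PySem.Dict Int Int :=
  pvDayOfWeekNameByNumber.keys.foldl
    (fun (p : Int × PySem.Dict Int Int) w' =>
      if w ≠ w' then
        let h' := p.2.setdefault w' 0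
        (p.1 + ((h'.get? w').getD 0), h')
      else p)
    (0, h)

-- the best/worst bookkeeping of one outer aggregation iteration; state (bestDay, maxN, worstDay, minN)
def pvAggQuadA (dc : PySem.Dict Int Int) (h : PySem.Dict Int Int)
    (s : Int × Int × Int × Int) (w : Int) : Int × Int × Int × Int :=
  let t := ((dc.get? w).getD 0) + (pvInnerA w h).1
  let s := if t > s.2.1 then (w, t, s.2.2.1, s.2.2.2) else s
  if s.2.2.2 > t then (s.1, s.2.1, w, t) else s

def pvAggDictA (h : PySem.Dict Int Int) (w : Int) : PySem.Dict Int Int :=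
  (pvInnerA w h).2

def getBestAdnWorstDays (year : Int) (yearStartDay : Int) (holidays : List (String × Int)) :
    String × String :=
  let isLeapYear := PySem.Int.mod year 400 == 0 || (PySem.Int.mod year 4 == 0 && PySem.Int.mod year 100 != 0)
  let totalDayCount : Int := if isLeapYear then 366 else 365
  -- KeyError for a month name outside the dict is excluded by Pre_; getD 0 stands for the raise
  let holidaySet : PySem.Set (Int × Int) :=
    PySem.Set.ofList (holidays.map (fun x => ((pvMonthNumberByName.get? x.1).getD 0, x.2)))
  let cm0 := (pvMonthNumberByName.get? "January").getD 0
  let cal0 : Int × Int × Int := (cm0, 1, (pvDayCountByMonth.get? cm0).getD 0)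
  let loop := (PySem.List.pyRange 0 totalDayCount 1).foldl
    (fun (s : (PySem.Dict Int Int × PySem.Dict Int Int) × (Int × Int × Int)) day =>
      (pvDictStepA yearStartDay holidaySet s.2 day s.1, pvCalStepA isLeapYear s.2))
    ((PySem.Dict.empty, PySem.Dict.empty), cal0)
  let dc := loop.1.1
  let agg := pvDayOfWeekNameByNumber.keys.foldl
    (fun (s : (Int × Int × Int × Int) × PySem.Dict Int Int) w =>
      (pvAggQuadA dc s.2 s.1 w, pvAggDictA s.2 w))
    ((1, 0, 1, 366), loop.1.2)
  ((pvDayOfWeekNameByNumber.get? agg.1.1).getD "", (pvDayOfWeekNameByNumber.get? agg.1.2.2.1).getD "")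

-- ===== PORT B =====
def pvNamesB : List String :=
  ["Monday", "Tuesday", "Wednesday", "Thursday", "Friday", "Saturday", "Sunday"]

def pvMonthLengthsB (isLeapYear : Bool) : List Int :=
  [31, if isLeapYear then 29 else 28, 31, 30, 31, 30, 31, 31, 30, 31, 30, 31]

-- `offsets.append(acc); acc += ml`
def pvOffsetsB (monthLengths : List Int) : List Int :=
  (monthLengths.foldl (fun (p : List Int × Int) ml => (p.1 ++ [p.2], p.2 + ml)) ([], 0)).1

-- (yearStartDay + offsets[m-1] + d - 1) % 7  (m ∈ [1,12] under Pre_, so the index is in range)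
def pvWeekdayB (yearStartDay : Int) (offsets : List Int) (md : Int × Int) : Int :=
  PySem.Int.mod (yearStartDay + offsets.getD (md.1 - 1).toNat 0 + md.2 - 1) 7

def getBestAdnWorstDays_alt (year : Int) (yearStartDay : Int) (holidays : List (String × Int)) :
    String × String :=
  let isLeapYear := PySem.Int.mod year 400 == 0 || (PySem.Int.mod year 4 == 0 && PySem.Int.mod year 100 != 0)
  let monthLengths := pvMonthLengthsB isLeapYear
  let totalDayCount : Int := if isLeapYear then 366 else 365
  let offsets := pvOffsetsB monthLengths
  let holidaySet : PySem.Set (Int × Int) :=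
    PySem.Set.ofList (holidays.map (fun x => ((pvMonthNumberByName.get? x.1).getD 0, x.2)))
  let hp := holidaySet.foldl
    (fun (s : PySem.Dict Int Int × Int) md =>
      if 1 ≤ md.2 ∧ md.2 ≤ monthLengths.getD (md.1 - 1).toNat 0 then
        let w := pvWeekdayB yearStartDay offsets md
        (s.1.insert w (s.1.getD w 0 + 1), s.2 + 1)
      else s)
    (PySem.Dict.empty, 0)
  let res := (PySem.List.pyRange 0 7 1).foldl
    (fun (s : Int × Int × Int × Int) w =>
      let cnt := PySem.Int.floordiv totalDayCount 7 +
        (if PySem.Int.mod (w - yearStartDay) 7 < PySem.Int.mod totalDayCount 7 then 1 else 0)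
      let t := cnt + hp.2 - hp.1.getD w 0
      let s := if t > s.2.1 then (w, t, s.2.2.1, s.2.2.2) else s
      if s.2.2.2 > t then (s.1, s.2.1, w, t) else s)
    (1, 0, 1, 366)
  (pvNamesB.getD res.1.toNat "", pvNamesB.getD res.2.2.1.toNat "")

-- ===== PRECONDITION & SPEC =====
-- Pre_ excludes exactly the holiday lists naming a month outside the twelve English
-- month names, on which the Python A raises KeyError (B raises there too).
def Pre_getBestAdnWorstDays (year : Int) (yearStartDay : Int) (holidays : List (String × Int)) : Prop :=
  ∀ p ∈ holidays, (pvMonthNumberByName.get? p.1).isSome = true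
instance (year : Int) (yearStartDay : Int) (holidays : List (String × Int)) : Decidable (Pre_getBestAdnWorstDays year yearStartDay holidays) := by unfold Pre_getBestAdnWorstDays; infer_instance

def pvWitness_getBestAdnWorstDays : Int × Int × (List (String × Int)) :=
  (2023, 6, [("January", 1), ("May", 9), ("January", 1)])

def Spec_getBestAdnWorstDays (year : Int) (yearStartDay : Int) (holidays : List (String × Int)) (out : String × String) : Prop := out = getBestAdnWorstDays_alt year yearStartDay holidays
instance (year : Int) (yearStartDay : Int) (holidays : List (String × Int)) (out : String × String) : Decidable (Spec_getBestAdnWorstDays year yearStartDay holidays out) := by unfold Spec_getBestAdnWorstDays; infer_instance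

-- ===== CLAIM (what is proved, stated in full; the proofs are below) =====
def Claim_equal_getBestAdnWorstDays : Prop := ∀ (year : Int) (yearStartDay : Int) (holidays : List (String × Int)), Dom_getBestAdnWorstDays year yearStartDay holidays → Pre_getBestAdnWorstDays year yearStartDay holidays → Spec_getBestAdnWorstDays year yearStartDay holidays (getBestAdnWorstDays year yearStartDay holidays)

-- ===== LEMMAS AND PROOFS =====
set_option maxRecDepth 10000

-- the calendar/dict state of A's loops evolves autonomously: the list of its successive values
def pvIterOn {γ β : Type} (g : γ → β → γ) : γ → List β → List γ
  | _, [] => []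
  | c, x :: xs => c :: pvIterOn g (g c x) xs

theorem pvIterOn_length {γ β : Type} (g : γ → β → γ) :
    ∀ (l : List β) (c : γ), (pvIterOn g c l).length = l.length
  | [], _ => rfl
  | x :: xs, c => by simp [pvIterOn, pvIterOn_length g xs]

-- A's day loop split into the dictionary fold over (day, calendar-state) pairs
theorem pv_main_split (ysd : Int) (S : PySem.Set (Int × Int)) (leap : Bool) :
    ∀ (l : List Int) (d : PySem.Dict Int Int × PySem.Dict Int Int) (c : Int × Int × Int),
      (l.foldl (fun s day => (pvDictStepA ysd S s.2 day s.1, pvCalStepA leap s.2)) (d, c)).1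
      = (l.zip (pvIterOn (fun c (_ : Int) => pvCalStepA leap c) c l)).foldl
          (fun d p => pvDictStepA ysd S p.2 p.1 d) d
  | [], _, _ => rfl
  | x :: xs, d, c => by
      simpa [pvIterOn] using pv_main_split ysd S leap xs (pvDictStepA ysd S c x d) (pvCalStepA leap c)

-- A's aggregation loop split likewise
theorem pv_agg_split (dc : PySem.Dict Int Int) :
    ∀ (l : List Int) (q : Int × Int × Int × Int) (h : PySem.Dict Int Int),
      (l.foldl (fun s w => (pvAggQuadA dc s.2 s.1 w, pvAggDictA s.2 w)) (q, h)).1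
      = (l.zip (pvIterOn (fun h w => pvAggDictA h w) h l)).foldl
          (fun q p => pvAggQuadA dc p.2 q p.1) q
  | [], _, _ => rfl
  | x :: xs, q, h => by
      simpa [pvIterOn] using pv_agg_split dc xs (pvAggQuadA dc h q x) (pvAggDictA h x)

-- Python's `d.setdefault(w, 0); d[w] += 1` is `d[w] = d.get(w, 0) + 1`
theorem pv_setdefault_insert (d : PySem.Dict Int Int) (w : Int) :
    (d.setdefault w 0).insert w (((d.setdefault w 0).get? w).getD 0 + 1) = d.modify w 0 (· + 1) := by
  rw [PySem.Dict.get?_setdefault_self]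
  by_cases hc : d.contains w = true
  · rw [PySem.Dict.setdefault_of_contains _ _ hc]
    simp [PySem.Dict.modify, PySem.Dict.getD_eq_get?_getD]
  · rw [PySem.Dict.setdefault_of_not_contains _ _ (by simpa using hc),
        PySem.Dict.insert_insert_self]
    simp [PySem.Dict.modify, PySem.Dict.getD_eq_get?_getD]

-- the two dictionaries of A's day loop evolve independently, by modify-counting
theorem pv_dict_split (ysd : Int) (S : PySem.Set (Int × Int)) :
    ∀ (zl : List (Int × Int × Int × Int)) (dc hol : PySem.Dict Int Int),
      zl.foldl (fun d p => pvDictStepA ysd S p.2 p.1 d) (dc, hol)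
      = (zl.foldl (fun d p => d.modify (PySem.Int.mod (ysd + p.1) 7) 0 (· + 1)) dc,
         zl.foldl (fun h p => if PySem.Set.contains S (p.2.1, p.2.2.1) = true
             then h.modify (PySem.Int.mod (ysd + p.1) 7) 0 (· + 1) else h) hol)
  | [], _, _ => rfl
  | p :: ps, dc, hol => by
      have hstep : pvDictStepA ysd S p.2 p.1 (dc, hol)
          = (dc.modify (PySem.Int.mod (ysd + p.1) 7) 0 (· + 1),
             if PySem.Set.contains S (p.2.1, p.2.2.1) = true
             then hol.modify (PySem.Int.mod (ysd + p.1) 7) 0 (· + 1) else hol) := by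
        unfold pvDictStepA
        by_cases hc : PySem.Set.contains S (p.2.1, p.2.2.1) = true <;>
          simp [pv_setdefault_insert]
      simp only [List.foldl, hstep]
      exact pv_dict_split ysd S ps _ _

-- setdefault with default 0 never changes a get-with-default-0 lookup
theorem pv_getD0_setdefault (d : PySem.Dict Int Int) (k j : Int) :
    ((d.setdefault k 0).get? j).getD 0 = (d.get? j).getD 0 := by
  by_cases hj : j = k
  · subst hj; rw [PySem.Dict.get?_setdefault_self]; rfl
  · rw [PySem.Dict.get?_setdefault_of_ne _ _ hj]

-- the running sum of A's inner loop only depends on the lookups of the dict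
theorem pv_sumfold_congr (w : Int) (h h' : PySem.Dict Int Int)
    (hh : ∀ j, (h.get? j).getD 0 = (h'.get? j).getD 0) (ks : List Int) (a : Int) :
    ks.foldl (fun a w' => if w ≠ w' then a + (h.get? w').getD 0 else a) a
    = ks.foldl (fun a w' => if w ≠ w' then a + (h'.get? w').getD 0 else a) a := by
  refine PySem.List.foldl_congr_mem ks _ _ a ?_
  intro acc x _
  by_cases hx : w ≠ x <;> simp [hx, hh]

-- A's inner loop = a pure sum plus a pure setdefault fold
theorem pv_inner_spec (w : Int) :
    ∀ (ks : List Int) (a : Int) (h : PySem.Dict Int Int),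
      ks.foldl (fun (p : Int × PySem.Dict Int Int) w' =>
        if w ≠ w' then
          let h' := p.2.setdefault w' 0
          (p.1 + ((h'.get? w').getD 0), h')
        else p) (a, h)
      = (ks.foldl (fun a w' => if w ≠ w' then a + (h.get? w').getD 0 else a) a,
         ks.foldl (fun d w' => if w ≠ w' then d.setdefault w' 0 else d) h)
  | [], _, _ => rfl
  | k :: ks, a, h => by
      simp only [List.foldl]
      by_cases hk : w ≠ k
      · rw [if_pos hk, if_pos hk, if_pos hk]
        rw [pv_inner_spec w ks _ _, PySem.Dict.get?_setdefault_self, Option.getD_some]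
        refine Prod.ext ?_ rfl
        exact pv_sumfold_congr w (h.setdefault k 0) h (fun j => pv_getD0_setdefault h k j) ks _
      · rw [if_neg hk, if_neg hk, if_neg hk]
        exact pv_inner_spec w ks a h

-- the dict side of the inner loop never changes lookups
theorem pv_innerdict_getD0 (w : Int) :
    ∀ (ks : List Int) (h : PySem.Dict Int Int) (j : Int),
      (((ks.foldl (fun d w' => if w ≠ w' then d.setdefault w' 0 else d) h).get? j)).getD 0
      = (h.get? j).getD 0
  | [], _, _ => rfl
  | k :: ks, h, j => by
      simp only [List.foldl]
      by_cases hk : w ≠ k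
      · rw [if_pos hk, pv_innerdict_getD0 w ks _ j, pv_getD0_setdefault]
      · rw [if_neg hk]
        exact pv_innerdict_getD0 w ks h j

-- every dict in the aggregation loop's chain keeps the original lookups
theorem pv_iter_getD0 :
    ∀ (l : List Int) (h : PySem.Dict Int Int),
      ∀ c ∈ pvIterOn (fun h w => pvAggDictA h w) h l, ∀ j, (c.get? j).getD 0 = (h.get? j).getD 0
  | [], _, c, hc, _ => by simp [pvIterOn] at hc
  | x :: xs, h, c, hc, j => by
      simp only [pvIterOn, List.mem_cons] at hc
      rcases hc with rfl | hc
      · rfl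
      · have h1 := pv_iter_getD0 xs (pvAggDictA h x) c hc j
        rw [h1]
        show (((pvInnerA x h).2).get? j).getD 0 = _
        rw [pvInnerA, pv_inner_spec]
        exact pv_innerdict_getD0 x _ h j

-- A's best/worst bookkeeping only depends on the dict through its lookups
theorem pv_aggquad_congr (dc : PySem.Dict Int Int) (h h' : PySem.Dict Int Int)
    (hh : ∀ j, (h.get? j).getD 0 = (h'.get? j).getD 0) (q : Int × Int × Int × Int) (w : Int) :
    pvAggQuadA dc h q w = pvAggQuadA dc h' q w := by
  unfold pvAggQuadA pvInnerA
  rw [pv_inner_spec, pv_inner_spec]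
  have := pv_sumfold_congr w h h' hh pvDayOfWeekNameByNumber.keys 0
  simp only [this]

-- closed form for the weekday histogram of `range n` (Nat level)
theorem pv_count_mod_range_nat (r w : Nat) (hw : w < 7) :
    ∀ n : Nat, ((List.range n).map (fun k => (r + k) % 7)).count w
      = n / 7 + (if (w + 7 - r % 7) % 7 < n % 7 then 1 else 0)
  | 0 => by simp
  | n + 1 => by
      rw [List.range_succ, List.map_append, List.count_append]
      rw [pv_count_mod_range_nat r w hw n]
      by_cases h : (r + n) % 7 = w <;>
        simp [h] <;> split_ifs <;> omega

-- closed form for A's weekday counts, in the Int form both ports use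
theorem pv_dc_closed (ysd w : Int) (n : Nat) (hw : 0 ≤ w) (hw7 : w < 7) :
    ((((PySem.List.pyRange 0 (n : Int) 1).map (fun day => PySem.Int.mod (ysd + day) 7)).count w : Nat) : Int)
    = PySem.Int.floordiv (n : Int) 7
      + (if PySem.Int.mod (w - ysd) 7 < PySem.Int.mod (n : Int) 7 then 1 else 0) := by
  have hrn : ((PySem.Int.mod ysd 7).toNat : Int) = PySem.Int.mod ysd 7 := by
    have := PySem.Int.mod_nonneg ysd (b := 7) (by norm_num)
    omega
  set rn : Nat := (PySem.Int.mod ysd 7).toNat with hrndef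
  have hmod : PySem.Int.mod ysd 7 = ysd % 7 := PySem.Int.mod_eq_emod_of_pos (by norm_num)
  have hmap : (PySem.List.pyRange 0 (n : Int) 1).map (fun day => PySem.Int.mod (ysd + day) 7)
      = ((List.range n).map (fun k => (rn + k) % 7)).map (fun m : Nat => (m : Int)) := by
    rw [PySem.List.pyRange_zero_natCast, List.map_map, List.map_map]
    refine List.map_congr_left ?_
    intro k _
    simp only [Function.comp]
    rw [PySem.Int.mod_eq_emod_of_pos (by norm_num)]
    omega
  rw [hmap]
  have hwn : w = ((w.toNat : Nat) : Int) := by omega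
  rw [hwn, List.count_map_of_injective _ _ (fun a b => by omega)]
  rw [pv_count_mod_range_nat rn w.toNat (by omega) n]
  rw [PySem.Int.floordiv_eq_ediv_of_pos (by norm_num),
      PySem.Int.mod_eq_emod_of_pos (by norm_num), PySem.Int.mod_eq_emod_of_pos (by norm_num)]
  push_cast
  split_ifs <;> omega

-- B's validity test on a deduplicated holiday
def pvValidB (mls : List Int) (md : Int × Int) : Bool :=
  decide (1 ≤ md.2 ∧ md.2 ≤ mls.getD (md.1 - 1).toNat 0)

-- B's holiday loop = an insert-counting fold over the valid dates plus their number
theorem pv_hp_spec (ysd : Int) (mls offs : List Int) :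
    ∀ (S : List (Int × Int)) (h : PySem.Dict Int Int) (t : Int),
      S.foldl (fun (s : PySem.Dict Int Int × Int) md =>
          if 1 ≤ md.2 ∧ md.2 ≤ mls.getD (md.1 - 1).toNat 0 then
            let w := pvWeekdayB ysd offs md
            (s.1.insert w (s.1.getD w 0 + 1), s.2 + 1)
          else s) (h, t)
      = (((S.filter (pvValidB mls)).map (pvWeekdayB ysd offs)).foldl
            (fun d x => d.insert x (d.getD x 0 + 1)) h,
         t + ((S.filter (pvValidB mls)).length : Int))
  | [], _, _ => by simp
  | md :: S, h, t => by
      simp only [List.foldl]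
      by_cases hv : 1 ≤ md.2 ∧ md.2 ≤ mls.getD (md.1 - 1).toNat 0
      · rw [if_pos hv, List.filter_cons_of_pos (p := pvValidB mls) (decide_eq_true hv),
            List.map_cons]
        rw [pv_hp_spec ysd mls offs S _ _]
        simp only [List.foldl, List.length_cons]
        refine Prod.ext (by rfl) ?_
        push_cast
        ring
      · rw [if_neg hv, List.filter_cons_of_neg (p := pvValidB mls) (by
          show ¬ pvValidB mls md = true
          simp only [pvValidB, decide_eq_true_eq]
          exact hv)]
        exact pv_hp_spec ysd mls offs S h t

theorem pv_month_bound (s : String) (v : Int) (h : pvMonthNumberByName.get? s = some v) :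
    1 ≤ v ∧ v ≤ 12 := by
  have hm := PySem.Dict.mem_items_of_get?_eq_some _ h
  have hd : pvMonthNumberByName.items = [("January", 1), ("February", 2), ("March", 3),
      ("April", 4), ("May", 5), ("June", 6), ("July", 7), ("August", 8),
      ("September", 9), ("October", 10), ("November", 11), ("December", 12)] := by decide
  rw [hd] at hm
  simp only [List.mem_cons, List.not_mem_nil, or_false, Prod.mk.injEq] at hm
  rcases hm with ⟨-, rfl⟩|⟨-, rfl⟩|⟨-, rfl⟩|⟨-, rfl⟩|⟨-, rfl⟩|⟨-, rfl⟩|⟨-, rfl⟩|⟨-, rfl⟩|⟨-, rfl⟩|⟨-, rfl⟩|⟨-, rfl⟩|⟨-, rfl⟩ <;> omega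

-- all dates of the year, month block by month block
def pvDates (leap : Bool) : List (Int × Int) :=
  (PySem.List.pyRange 1 13 1).flatMap (fun m =>
    (PySem.List.pyRange 1 ((pvMonthLengthsB leap).getD (m - 1).toNat 0 + 1) 1).map (fun d => (m, d)))

theorem pv_dates_mem (leap : Bool) (m d : Int) (h1 : 1 ≤ m) (h2 : m ≤ 12) :
    (m, d) ∈ pvDates leap ↔ 1 ≤ d ∧ d ≤ (pvMonthLengthsB leap).getD (m - 1).toNat 0 := by
  simp only [pvDates, List.mem_flatMap, List.mem_map, PySem.List.mem_pyRange_one, Prod.mk.injEq]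
  constructor
  · rintro ⟨m', hm', d', hd', rfl, rfl⟩
    omega
  · intro hd
    exact ⟨m, by omega, d, by omega, rfl, rfl⟩

def pvProj (p : Int × Int × Int × Int) : Int × Int := (p.2.1, p.2.2.1)

def pvZl (leap : Bool) : List (Int × Int × Int × Int) :=
  (PySem.List.pyRange 0 (if leap then (366 : Int) else 365) 1).zip
    (pvIterOn (fun c (_ : Int) => pvCalStepA leap c)
      ((pvMonthNumberByName.get? "January").getD 0, 1,
        (pvDayCountByMonth.get? ((pvMonthNumberByName.get? "January").getD 0)).getD 0)
      (PySem.List.pyRange 0 (if leap then (366 : Int) else 365) 1))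

set_option maxHeartbeats 4000000 in
theorem pv_F1 (leap : Bool) : (pvZl leap).map pvProj = pvDates leap := by
  cases leap <;> decide

set_option maxHeartbeats 4000000 in
theorem pv_F2 (leap : Bool) : ∀ p ∈ pvZl leap,
    p.1 = (pvOffsetsB (pvMonthLengthsB leap)).getD (p.2.1 - 1).toNat 0 + p.2.2.1 - 1 := by
  have hall : ∀ leap : Bool, (pvZl leap).all (fun p =>
      p.1 == (pvOffsetsB (pvMonthLengthsB leap)).getD (p.2.1 - 1).toNat 0 + p.2.2.1 - 1) = true := by
    intro leap
    cases leap <;> decide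
  intro p hp
  have := List.all_eq_true.mp (hall leap) p hp
  simpa using this

set_option maxHeartbeats 4000000 in
set_option maxHeartbeats 4000000 in
theorem pv_F3 (leap : Bool) : (pvDates leap).Nodup := by
  cases leap <;> decide

-- the seven weekday counts of a list of weekday numbers add up to its length
theorem pv_count_partition :
    ∀ (l : List Int), (∀ x ∈ l, 0 ≤ x ∧ x < 7) →
      (l.count 0 : Int) + l.count 1 + l.count 2 + l.count 3 + l.count 4 + l.count 5 + l.count 6
        = l.length
  | [], _ => by simp
  | x :: l, hb => by
      obtain ⟨hx1, hx2⟩ := hb x (List.mem_cons_self ..)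
      have ih := pv_count_partition l (fun y hy => hb y (List.mem_cons_of_mem _ hy))
      simp only [List.count_cons, List.length_cons]
      push_cast
      interval_cases x <;> simp <;> omega

-- the selected best/worst weekdays stay in 0..6
theorem pv_quad_bounds (t : Int → Int) :
    ∀ (l : List Int), (∀ w ∈ l, 0 ≤ w ∧ w < 7) → ∀ (s : Int × Int × Int × Int),
      0 ≤ s.1 → s.1 < 7 → 0 ≤ s.2.2.1 → s.2.2.1 < 7 →
      (0 ≤ (l.foldl (fun s w =>
          let s' := if t w > s.2.1 then (w, t w, s.2.2.1, s.2.2.2) else s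
          if s'.2.2.2 > t w then (s'.1, s'.2.1, w, t w) else s') s).1 ∧
       (l.foldl (fun s w =>
          let s' := if t w > s.2.1 then (w, t w, s.2.2.1, s.2.2.2) else s
          if s'.2.2.2 > t w then (s'.1, s'.2.1, w, t w) else s') s).1 < 7) ∧
      (0 ≤ (l.foldl (fun s w =>
          let s' := if t w > s.2.1 then (w, t w, s.2.2.1, s.2.2.2) else s
          if s'.2.2.2 > t w then (s'.1, s'.2.1, w, t w) else s') s).2.2.1 ∧
       (l.foldl (fun s w =>
          let s' := if t w > s.2.1 then (w, t w, s.2.2.1, s.2.2.2) else s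
          if s'.2.2.2 > t w then (s'.1, s'.2.1, w, t w) else s') s).2.2.1 < 7)
  | [], _, s, h1, h2, h3, h4 => ⟨⟨h1, h2⟩, ⟨h3, h4⟩⟩
  | x :: l, hb, s, h1, h2, h3, h4 => by
      have hx := hb x (List.mem_cons_self ..)
      have hb' : ∀ w ∈ l, 0 ≤ w ∧ w < 7 := fun y hy => hb y (List.mem_cons_of_mem _ hy)
      simp only [List.foldl]
      have hrec := fun (s : Int × Int × Int × Int) h1 h2 h3 h4 =>
        pv_quad_bounds t l hb' s h1 h2 h3 h4
      split_ifs <;> apply hrec <;> (try dsimp only) <;> omega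

-- the two ports' weekday-name lookups agree on 0..6
theorem pv_lookup (x : Int) (h1 : 0 ≤ x) (h2 : x < 7) :
    (pvDayOfWeekNameByNumber.get? x).getD "" = pvNamesB.getD x.toNat "" := by
  interval_cases x <;> decide

theorem pv_dcA_getD (ysd : Int) :
    ∀ (zl : List (Int × Int × Int × Int)) (d : PySem.Dict Int Int) (w : Int),
      (zl.foldl (fun d p => d.modify (PySem.Int.mod (ysd + p.1) 7) 0 (· + 1)) d).getD w 0
      = d.getD w 0 + ((zl.map (fun p => PySem.Int.mod (ysd + p.1) 7)).count w : Int)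
  | [], d, w => by simp
  | p :: ps, d, w => by
      simp only [List.foldl, List.map_cons, List.count_cons]
      rw [pv_dcA_getD ysd ps _ w, PySem.Dict.getD_modify]
      by_cases hw : w = PySem.Int.mod (ysd + p.1) 7
      · simp only [hw, beq_self_eq_true, if_true]
        push_cast
        ring
      · have : ¬(PySem.Int.mod (ysd + p.1) 7 == w) = true := by
          simp only [beq_iff_eq]
          exact fun h => hw h.symm
        simp only [if_neg hw, this, if_false, Bool.false_eq_true]
        push_cast
        ring

theorem pv_holA_getD (ysd : Int) (S : PySem.Set (Int × Int)) :
    ∀ (zl : List (Int × Int × Int × Int)) (d : PySem.Dict Int Int) (w : Int),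
      (zl.foldl (fun h p => if PySem.Set.contains S (p.2.1, p.2.2.1) = true
          then h.modify (PySem.Int.mod (ysd + p.1) 7) 0 (· + 1) else h) d).getD w 0
      = d.getD w 0
        + (((zl.filter (fun p => PySem.Set.contains S (p.2.1, p.2.2.1))).map
            (fun p => PySem.Int.mod (ysd + p.1) 7)).count w : Int)
  | [], d, w => by simp
  | p :: ps, d, w => by
      simp only [List.foldl, List.filter_cons]
      by_cases hmem : PySem.Set.contains S (p.2.1, p.2.2.1) = true
      · simp only [hmem, if_true, List.map_cons, List.count_cons]
        rw [pv_holA_getD ysd S ps _ w, PySem.Dict.getD_modify]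
        by_cases hw : w = PySem.Int.mod (ysd + p.1) 7
        · simp only [hw, beq_self_eq_true, if_true]
          push_cast
          ring
        · have : ¬(PySem.Int.mod (ysd + p.1) 7 == w) = true := by
            simp only [beq_iff_eq]
            exact fun h => hw h.symm
          simp only [if_neg hw, this, if_false, Bool.false_eq_true]
          push_cast
          ring
      · simp only [hmem, if_false, Bool.false_eq_true]
        exact pv_holA_getD ysd S ps d w

theorem pv_foldl_fst {α γ : Type} (F : γ → Int → γ) :
    ∀ (l : List (Int × α)) (init : γ),
      l.foldl (fun q p => F q p.1) init = (l.map Prod.fst).foldl F init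
  | [], _ => rfl
  | p :: ps, init => by
      simp only [List.foldl, List.map_cons]
      exact pv_foldl_fst F ps _

theorem pv_keys_eq : pvDayOfWeekNameByNumber.keys = [0, 1, 2, 3, 4, 5, 6] := by decide

theorem pv_range7 : PySem.List.pyRange 0 7 1 = [0, 1, 2, 3, 4, 5, 6] := by decide

theorem pv_mainloop (leap : Bool) (ysd : Int) (S : PySem.Set (Int × Int)) :
    ((PySem.List.pyRange 0 (if leap then (366 : Int) else 365) 1).foldl
       (fun (s : (PySem.Dict Int Int × PySem.Dict Int Int) × (Int × Int × Int)) day =>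
         (pvDictStepA ysd S s.2 day s.1, pvCalStepA leap s.2))
       ((PySem.Dict.empty, PySem.Dict.empty),
        ((pvMonthNumberByName.get? "January").getD 0, 1,
         (pvDayCountByMonth.get? ((pvMonthNumberByName.get? "January").getD 0)).getD 0))).1
    = ((pvZl leap).foldl (fun d p => d.modify (PySem.Int.mod (ysd + p.1) 7) 0 (· + 1))
         PySem.Dict.empty,
       (pvZl leap).foldl (fun h p => if PySem.Set.contains S (p.2.1, p.2.2.1) = true
           then h.modify (PySem.Int.mod (ysd + p.1) 7) 0 (· + 1) else h) PySem.Dict.empty) := by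
  rw [pv_main_split]
  exact pv_dict_split ysd S (pvZl leap) PySem.Dict.empty PySem.Dict.empty

-- the seven inner-loop sums, one per weekday
set_option maxHeartbeats 1600000 in
theorem pv_inner_vals (h : PySem.Dict Int Int) (w : Int)
    (hw : w ∈ ([0, 1, 2, 3, 4, 5, 6] : List Int)) :
    (pvInnerA w h).1
    = (if w ≠ 0 then (h.get? 0).getD 0 else 0) + (if w ≠ 1 then (h.get? 1).getD 0 else 0)
      + (if w ≠ 2 then (h.get? 2).getD 0 else 0) + (if w ≠ 3 then (h.get? 3).getD 0 else 0)
      + (if w ≠ 4 then (h.get? 4).getD 0 else 0) + (if w ≠ 5 then (h.get? 5).getD 0 else 0)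
      + (if w ≠ 6 then (h.get? 6).getD 0 else 0) := by
  rw [pvInnerA, pv_inner_spec, pv_keys_eq]
  simp only [List.mem_cons, List.not_mem_nil, or_false] at hw
  rcases hw with rfl | rfl | rfl | rfl | rfl | rfl | rfl <;> norm_num [List.foldl]

-- B's aggregation fold in canonical form
def pvBAgg (ysd N tot : Int) (hpd : PySem.Dict Int Int) : Int × Int × Int × Int :=
  List.foldl (fun (s : Int × Int × Int × Int) w =>
    let t := PySem.Int.floordiv N 7
      + (if PySem.Int.mod (w - ysd) 7 < PySem.Int.mod N 7 then 1 else 0) + tot - hpd.getD w 0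
    let s' := if t > s.2.1 then (w, t, s.2.2.1, s.2.2.2) else s
    if s'.2.2.2 > t then (s'.1, s'.2.1, w, t) else s') (1, 0, 1, 366) [0, 1, 2, 3, 4, 5, 6]

-- the two port bodies agree once the leap flag and the deduplicated holiday set are abstracted
theorem pv_core (leap : Bool) (ysd : Int) (S : PySem.Set (Int × Int))
    (hS : List.Nodup S) (hm : ∀ md ∈ S, 1 ≤ md.1 ∧ md.1 ≤ 12)
    (n : Nat) (hn : (if leap then (366 : Int) else 365) = (n : Int)) (hn0 : 0 < n) :
    (let totalDayCount : Int := if leap then 366 else 365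
     let cm0 := (pvMonthNumberByName.get? "January").getD 0
     let cal0 : Int × Int × Int := (cm0, 1, (pvDayCountByMonth.get? cm0).getD 0)
     let loop := (PySem.List.pyRange 0 totalDayCount 1).foldl
       (fun (s : (PySem.Dict Int Int × PySem.Dict Int Int) × (Int × Int × Int)) day =>
         (pvDictStepA ysd S s.2 day s.1, pvCalStepA leap s.2))
       ((PySem.Dict.empty, PySem.Dict.empty), cal0)
     let dc := loop.1.1
     let agg := pvDayOfWeekNameByNumber.keys.foldl
       (fun (s : (Int × Int × Int × Int) × PySem.Dict Int Int) w =>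
         (pvAggQuadA dc s.2 s.1 w, pvAggDictA s.2 w))
       ((1, 0, 1, 366), loop.1.2)
     ((pvDayOfWeekNameByNumber.get? agg.1.1).getD "", (pvDayOfWeekNameByNumber.get? agg.1.2.2.1).getD ""))
    = (let monthLengths := pvMonthLengthsB leap
       let totalDayCount : Int := if leap then 366 else 365
       let offsets := pvOffsetsB monthLengths
       let hp := S.foldl (fun (s : PySem.Dict Int Int × Int) md =>
           if 1 ≤ md.2 ∧ md.2 ≤ monthLengths.getD (md.1 - 1).toNat 0 then
             let w := pvWeekdayB ysd offsets md
             (s.1.insert w (s.1.getD w 0 + 1), s.2 + 1)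
           else s) (PySem.Dict.empty, 0)
       let res := (PySem.List.pyRange 0 7 1).foldl
         (fun (s : Int × Int × Int × Int) w =>
           let cnt := PySem.Int.floordiv totalDayCount 7 +
             (if PySem.Int.mod (w - ysd) 7 < PySem.Int.mod totalDayCount 7 then 1 else 0)
           let t := cnt + hp.2 - hp.1.getD w 0
           let s := if t > s.2.1 then (w, t, s.2.2.1, s.2.2.2) else s
           if s.2.2.2 > t then (s.1, s.2.1, w, t) else s)
         (1, 0, 1, 366)
       (pvNamesB.getD res.1.toNat "", pvNamesB.getD res.2.2.1.toNat "")) := by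
  dsimp only
  rw [pv_mainloop leap ysd S]
  rw [pv_hp_spec ysd (pvMonthLengthsB leap) (pvOffsetsB (pvMonthLengthsB leap)) S
    PySem.Dict.empty 0]
  dsimp only
  rw [pv_range7]
  set dcA : PySem.Dict Int Int := List.foldl (fun d p => d.modify (PySem.Int.mod (ysd + p.1) 7) 0 fun x => x + 1)
    PySem.Dict.empty (pvZl leap) with hdcA
  set holA : PySem.Dict Int Int := List.foldl (fun h p =>
      if PySem.Set.contains S (p.2.1, p.2.2.1) = true then
        h.modify (PySem.Int.mod (ysd + p.1) 7) 0 fun x => x + 1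
      else h) PySem.Dict.empty (pvZl leap) with hholA
  set hpd : PySem.Dict Int Int := List.foldl (fun d x => d.insert x (d.getD x 0 + 1)) PySem.Dict.empty
    (List.map (pvWeekdayB ysd (pvOffsetsB (pvMonthLengthsB leap)))
      (List.filter (pvValidB (pvMonthLengthsB leap)) S)) with hhpd
  -- A's weekday totals have B's closed form
  have hdcw : ∀ w : Int, 0 ≤ w → w < 7 →
      (dcA.get? w).getD 0
      = PySem.Int.floordiv (n : Int) 7
        + (if PySem.Int.mod (w - ysd) 7 < PySem.Int.mod (n : Int) 7 then 1 else 0) := by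
    intro w h1 h2
    rw [← PySem.Dict.getD_eq_get?_getD, hdcA, pv_dcA_getD, PySem.Dict.getD_empty]
    have hfst : (pvZl leap).map Prod.fst = PySem.List.pyRange 0 (n : Int) 1 := by
      rw [← hn]
      exact List.map_fst_zip (le_of_eq (pvIterOn_length _ _ _).symm)
    have hmap1 : (pvZl leap).map (fun p => PySem.Int.mod (ysd + p.1) 7)
        = (PySem.List.pyRange 0 (n : Int) 1).map (fun day => PySem.Int.mod (ysd + day) 7) := by
      rw [← hfst, List.map_map]
      rfl
    rw [hmap1, pv_dc_closed ysd w n h1 h2]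
    ring
  -- A's holiday histogram equals B's
  have hfm : ((pvZl leap).filter (fun p => PySem.Set.contains S (p.2.1, p.2.2.1))).map
        (fun p => PySem.Int.mod (ysd + p.1) 7)
      = ((pvDates leap).filter (fun md => PySem.Set.contains S md)).map
        (pvWeekdayB ysd (pvOffsetsB (pvMonthLengthsB leap))) := by
    have h1 : ((pvZl leap).filter (fun p => PySem.Set.contains S (p.2.1, p.2.2.1))).map
          (fun p => PySem.Int.mod (ysd + p.1) 7)
        = ((pvZl leap).filter (fun p => PySem.Set.contains S (p.2.1, p.2.2.1))).map
          (fun p => pvWeekdayB ysd (pvOffsetsB (pvMonthLengthsB leap)) (pvProj p)) := by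
      refine List.map_congr_left ?_
      intro p hp
      have h2 := pv_F2 leap p (List.mem_of_mem_filter hp)
      show PySem.Int.mod (ysd + p.1) 7 = _
      rw [pvWeekdayB, pvProj]
      congr 1
      rw [h2]
      ring
    have h4 : (((pvZl leap).filter (fun p => PySem.Set.contains S (p.2.1, p.2.2.1))).map pvProj).map
          (pvWeekdayB ysd (pvOffsetsB (pvMonthLengthsB leap)))
        = ((pvZl leap).filter (fun p => PySem.Set.contains S (p.2.1, p.2.2.1))).map
          (fun p => pvWeekdayB ysd (pvOffsetsB (pvMonthLengthsB leap)) (pvProj p)) := by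
      rw [List.map_map]
      rfl
    have h3 : ((pvZl leap).filter (fun p => PySem.Set.contains S (p.2.1, p.2.2.1))).map pvProj
        = ((pvZl leap).map pvProj).filter (fun md => PySem.Set.contains S md) := by
      rw [List.filter_map]
      rfl
    rw [h1, ← h4, h3, pv_F1]
  have hperm : ((pvDates leap).filter (fun md => PySem.Set.contains S md)).Perm
      (S.filter (pvValidB (pvMonthLengthsB leap))) := by
    rw [List.perm_ext_iff_of_nodup ((pv_F3 leap).filter _) (hS.filter _)]
    intro md
    simp only [List.mem_filter, PySem.Set.contains, List.contains_iff_mem, pvValidB,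
      decide_eq_true_eq]
    constructor
    · rintro ⟨hd, hc⟩
      obtain ⟨h1, h2⟩ := hm md hc
      have := (pv_dates_mem leap md.1 md.2 h1 h2).mp (by simpa using hd)
      exact ⟨hc, this⟩
    · rintro ⟨hmem, hv⟩
      obtain ⟨h1, h2⟩ := hm md hmem
      refine ⟨?_, hmem⟩
      have := (pv_dates_mem leap md.1 md.2 h1 h2).mpr hv
      simpa using this
  have hholw : ∀ w : Int, (holA.get? w).getD 0 = hpd.getD w 0 := by
    intro w
    rw [← PySem.Dict.getD_eq_get?_getD, hholA, pv_holA_getD, PySem.Dict.getD_empty, hhpd,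
      PySem.Dict.getD_foldl_insert_add_one, PySem.Dict.getD_empty, hfm,
      (hperm.map (pvWeekdayB ysd (pvOffsetsB (pvMonthLengthsB leap)))).count_eq]
  -- the holiday histogram sums to the number of valid distinct holidays
  have hbounds7 : ∀ x ∈ (S.filter (pvValidB (pvMonthLengthsB leap))).map
      (pvWeekdayB ysd (pvOffsetsB (pvMonthLengthsB leap))), 0 ≤ x ∧ x < 7 := by
    intro x hx
    obtain ⟨md, -, rfl⟩ := List.mem_map.mp hx
    exact ⟨PySem.Int.mod_nonneg _ (by norm_num), PySem.Int.mod_lt _ (by norm_num)⟩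
  have hcnt7 : ∀ w : Int, hpd.getD w 0
      = (((S.filter (pvValidB (pvMonthLengthsB leap))).map
          (pvWeekdayB ysd (pvOffsetsB (pvMonthLengthsB leap)))).count w : Int) := by
    intro w
    rw [hhpd, PySem.Dict.getD_foldl_insert_add_one, PySem.Dict.getD_empty]
    ring
  have htot : hpd.getD 0 0 + hpd.getD 1 0 + hpd.getD 2 0 + hpd.getD 3 0 + hpd.getD 4 0
      + hpd.getD 5 0 + hpd.getD 6 0
      = ((S.filter (pvValidB (pvMonthLengthsB leap))).length : Int) := by
    rw [hcnt7 0, hcnt7 1, hcnt7 2, hcnt7 3, hcnt7 4, hcnt7 5, hcnt7 6,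
      pv_count_partition _ hbounds7, List.length_map]
  -- rewire A's aggregation loop to the fixed holiday dict, then drop the threaded dict
  rw [pv_agg_split]
  have hcong : ∀ (acc : Int × Int × Int × Int),
      ∀ p ∈ pvDayOfWeekNameByNumber.keys.zip
        (pvIterOn (fun h w => pvAggDictA h w) holA pvDayOfWeekNameByNumber.keys),
      pvAggQuadA dcA p.2 acc p.1 = pvAggQuadA dcA holA acc p.1 := by
    intro acc p hp
    exact pv_aggquad_congr dcA p.2 holA
      (pv_iter_getD0 _ holA p.2 (List.of_mem_zip hp).2) acc p.1
  rw [PySem.List.foldl_congr_mem _ _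
    (fun q (p : Int × PySem.Dict Int Int) => pvAggQuadA dcA holA q p.1) _ hcong]
  rw [pv_foldl_fst (fun q w => pvAggQuadA dcA holA q w)]
  rw [List.map_fst_zip (le_of_eq (pvIterOn_length _ _ _).symm)]
  rw [pv_keys_eq]
  -- per-weekday agreement of the two aggregation steps
  have hBA : List.foldl (fun q w => pvAggQuadA dcA holA q w) (1, 0, 1, 366) [0, 1, 2, 3, 4, 5, 6]
      = pvBAgg ysd (n : Int)
          (0 + ((S.filter (pvValidB (pvMonthLengthsB leap))).length : Int)) hpd := by
    rw [pvBAgg]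
    refine PySem.List.foldl_congr_mem _ _ _ _ ?_
    intro acc w hw
    have ht : (dcA.get? w).getD 0 + (pvInnerA w holA).1
        = PySem.Int.floordiv (n : Int) 7
          + (if PySem.Int.mod (w - ysd) 7 < PySem.Int.mod (n : Int) 7 then 1 else 0)
          + (0 + ((S.filter (pvValidB (pvMonthLengthsB leap))).length : Int))
          - hpd.getD w 0 := by
      rw [pv_inner_vals holA w hw]
      simp only [hholw]
      simp only [List.mem_cons, List.not_mem_nil, or_false] at hw
      rcases hw with rfl | rfl | rfl | rfl | rfl | rfl | rfl <;>
        rw [hdcw _ (by norm_num) (by norm_num)] <;> norm_num <;> omega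
    simp only [pvAggQuadA]
    rw [ht]
  rw [hBA]
  -- turn the weekday-number lookups into the list lookups of B
  have hb := pv_quad_bounds (fun w => PySem.Int.floordiv (n : Int) 7
      + (if PySem.Int.mod (w - ysd) 7 < PySem.Int.mod (n : Int) 7 then 1 else 0)
      + (0 + ((S.filter (pvValidB (pvMonthLengthsB leap))).length : Int)) - hpd.getD w 0)
    [0, 1, 2, 3, 4, 5, 6] (by norm_num) (1, 0, 1, 366)
    (by norm_num) (by norm_num) (by norm_num) (by norm_num)
  have hb1 : 0 ≤ (pvBAgg ysd (n : Int)
      (0 + ((S.filter (pvValidB (pvMonthLengthsB leap))).length : Int)) hpd).1 := hb.1.1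
  have hb2 : (pvBAgg ysd (n : Int)
      (0 + ((S.filter (pvValidB (pvMonthLengthsB leap))).length : Int)) hpd).1 < 7 := hb.1.2
  have hb3 : 0 ≤ (pvBAgg ysd (n : Int)
      (0 + ((S.filter (pvValidB (pvMonthLengthsB leap))).length : Int)) hpd).2.2.1 := hb.2.1
  have hb4 : (pvBAgg ysd (n : Int)
      (0 + ((S.filter (pvValidB (pvMonthLengthsB leap))).length : Int)) hpd).2.2.1 < 7 := hb.2.2
  rw [pv_lookup _ hb1 hb2, pv_lookup _ hb3 hb4]
  rw [← hn]
  rfl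


-- ===== VERDICT (by name: the statement is the Claim_ definition above) =====
theorem getBestAdnWorstDays_spec : Claim_equal_getBestAdnWorstDays := by
  intro year ysd hols hdom hpre
  show getBestAdnWorstDays year ysd hols = getBestAdnWorstDays_alt year ysd hols
  unfold getBestAdnWorstDays getBestAdnWorstDays_alt
  have hm : ∀ md ∈ PySem.Set.ofList (hols.map (fun x => ((pvMonthNumberByName.get? x.1).getD 0, x.2))),
      1 ≤ md.1 ∧ md.1 ≤ 12 := by
    intro md hmem
    rw [PySem.Set.mem_ofList] at hmem
    obtain ⟨x, hx, rfl⟩ := List.mem_map.mp hmem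
    have hsome := hpre x hx
    obtain ⟨v, hv⟩ := Option.isSome_iff_exists.mp hsome
    have := pv_month_bound x.1 v hv
    simpa [hv] using this
  cases hL : (PySem.Int.mod year 400 == 0 || (PySem.Int.mod year 4 == 0 && PySem.Int.mod year 100 != 0)) with
  | false =>
      exact pv_core false ysd _ (PySem.Set.nodup_ofList _) hm 365 rfl (by norm_num)
  | true =>
      exact pv_core true ysd _ (PySem.Set.nodup_ofList _) hm 366 rfl (by norm_num)
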